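-- pv_equiv track=rewrite | github.com/KaayYoung/IR-and-Web-Search | Project/part1/project_part1.py | split_query
-- ===== SOURCE A (Python) =====
-- import copy
-- from collections import defaultdict
-- from itertools import combinations
--
-- def getTokens(query, entities):
--     for e in entities:
--         for word in e.split():
--             query = query.replace(word, '', 1)
--
--     return query.split()
--
-- def split_query(Q, DoE):
--
--     split_res = defaultdict(dict)
--     split_dict = defaultdict(list)
--
--     split_dict['entities'] = []
--     split_dict['tokens'] = Q.split()
--     split_res[0] = split_dict
--
--     max_len = 1
--     copy_Q = copy.copy(Q)
--
--     # Get the maximum length of entities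
--     for entity in DoE:
--         len_entities = len(entity.split())
--         if max_len < len_entities:
--             max_len = len_entities
--
--     token_count = defaultdict(int)
--     # Get the appearance time of each token
--     for ele in copy_Q.split():
--         if ele not in token_count:
--             token_count[ele] = 1
--         else:
--             token_count[ele] += 1
--
--     # Get all combinations which may be valiadated
--     candidate = []
--     for index in range(1, max_len + 1):
--         combination_arr = list(combinations(copy_Q.split(), index))
--         for tup in combination_arr:
--             str = ' '.join(tup)
--             if str in DoE and str not in candidate:
--                 candidate.append(str)
--
--     i = 1
--     for index in range(1, len(candidate) + 1):
--         combination_arr = list(combinations(candidate, index))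
--         for tup in combination_arr:
--             combination_count = defaultdict(int)
--             split_dict = defaultdict(list)
--             flag = 0
--             for ele in list(tup):
--                 for word in ele.split():
--                     if word not in combination_count:
--                         combination_count[word] = 1
--                     else:
--                         combination_count[word] += 1
--             # Check whether the number of appearance time of each token is bigger than it in orignal dict
--             for ele in combination_count:
--                 if combination_count[ele] > token_count[ele]:
--                     flag = 1
--                     break
--             if flag == 0:
--                 split_dict['tokens'] = getTokens(copy_Q, list(tup))
--                 split_dict['entities'] = list(tup)
--                 split_res[i] = split_dict
--                 i += 1
--
--     return split_res
-- ===== SOURCE B (Python) =====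
-- # B: same result, but the exponential subset phase is a pruned backtracking search with
-- # incremental word counts (supersets of an over-budget subset are never visited),
-- # instead of A's scan of all 2^n candidate subsets with a from-scratch recount for each.
-- from itertools import combinations
--
--
-- def _remove_entities(query, entities):
--     # identical removal semantics to A's getTokens: drop the first substring
--     # occurrence of each entity word from the query string, then split
--     for e in entities:
--         for word in e.split():
--             query = query.replace(word, '', 1)
--     return query.split()
--
--
-- def split_query(Q, DoE):
--     toks = Q.split()
--     res = {0: {'entities': [], 'tokens': list(toks)}}
--
--     budget = {}
--     for t in toks:
--         budget[t] = budget.get(t, 0) + 1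
--
--     max_len = 1
--     for e in DoE:
--         max_len = max(max_len, len(e.split()))
--
--     doe_set = set(DoE)
--     seen = set()
--     cand = []
--     for k in range(1, max_len + 1):
--         for tup in combinations(toks, k):
--             s = ' '.join(tup)
--             if s in doe_set and s not in seen:
--                 seen.add(s)
--                 cand.append(s)
--
--     def pick(cnt, cands, k):
--         # all lex-ordered k-subsets of cands whose words, added to cnt, stay within budget
--         if k == 0:
--             return [[]]
--         out = []
--         for j, e in enumerate(cands):
--             cnt2 = dict(cnt)
--             ok = True
--             for w in e.split():
--                 cnt2[w] = cnt2.get(w, 0) + 1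
--                 if cnt2[w] > budget.get(w, 0):
--                     ok = False
--             if ok:  # otherwise prune: every superset also exceeds the budget
--                 out.extend([e] + rest for rest in pick(cnt2, cands[j + 1:], k - 1))
--         return out
--
--     subsets = []
--     for k in range(1, len(cand) + 1):
--         subsets.extend(pick({}, cand, k))
--
--     for i, sub in enumerate(subsets, 1):
--         res[i] = {'tokens': _remove_entities(Q, sub), 'entities': sub}
--     return res
-- ===== Notes on version B (the rewrite author's own statement) =====
-- stated objective: alternative
-- what changed: The subset phase becomes a pruned backtracking search over candidates that extends only within-budget prefixes and maintains word counts incrementally, instead of A's enumeration of all 2^n candidate subsets with a from-scratch recount and full budget check for each; emission order (size-major, lexicographic) is kept identical.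
import Mathlib
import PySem

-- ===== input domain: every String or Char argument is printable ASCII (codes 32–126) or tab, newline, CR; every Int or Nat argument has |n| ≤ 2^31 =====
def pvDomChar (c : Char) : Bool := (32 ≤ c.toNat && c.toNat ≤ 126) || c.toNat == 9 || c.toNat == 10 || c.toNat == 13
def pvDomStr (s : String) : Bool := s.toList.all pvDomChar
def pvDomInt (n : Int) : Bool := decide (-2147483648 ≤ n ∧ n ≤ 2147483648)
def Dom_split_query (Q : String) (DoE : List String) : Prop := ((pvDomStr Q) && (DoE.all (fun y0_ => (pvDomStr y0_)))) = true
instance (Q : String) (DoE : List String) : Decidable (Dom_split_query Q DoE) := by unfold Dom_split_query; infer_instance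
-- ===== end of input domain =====

-- B replaces A's scan of all 2^n candidate subsets (each re-counted from scratch) by a pruned
-- backtracking enumeration with incremental word counts (an alternative algorithm; same return
-- value everywhere).

-- shared helpers: both Pythons contain the identical entity-removal code (q.replace(word,'',1)
-- drops the first SUBSTRING occurrence) and both enumerate itertools.combinations in lex order.
-- q.replace(w, '', 1): exact hand port of Python's count=1 replace via the first occurrence.
def pvReplaceFirst (q w : String) : String :=
  let i := PySem.Chars.find q.toList w.toList
  if i = -1 then q else String.ofList (q.toList.take i.toNat ++ q.toList.drop (i.toNat + w.toList.length))

def pvGetTokens (q : String) (ents : List String) : List String :=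
  PySem.Str.split₀ (ents.foldl (fun acc e => (PySem.Str.split₀ e).foldl (fun a w => pvReplaceFirst a w) acc) q)

-- itertools.combinations(xs, k), in Python's lexicographic-by-position order
def pvCombos {α : Type} : Nat → List α → List (List α)
  | 0, _ => [[]]
  | _+1, [] => []
  | k+1, x :: xs => (pvCombos k xs).map (x :: ·) ++ pvCombos (k+1) xs

-- ===== PORT A =====
-- A's counting step: 'if w not in d: d[w] = 1 else: d[w] += 1'
def pvStepA (d : PySem.Dict String Int) (w : String) : PySem.Dict String Int :=
  if d.contains w then d.insert w (d.getD w 0 + 1) else d.insert w 1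

def split_query (Q : String) (DoE : List String) : List (Int × List (String × List String)) :=
  let toks := PySem.Str.split₀ Q
  let maxLen := DoE.foldl (fun m e => if m < (PySem.Str.split₀ e).length then (PySem.Str.split₀ e).length else m) 1
  let tc := toks.foldl pvStepA PySem.Dict.empty
  let cand := (List.range' 1 maxLen).foldl (fun acc k =>
      (pvCombos k toks).foldl (fun acc tup =>
        let s := PySem.Str.join " " tup
        if s ∈ DoE ∧ s ∉ acc then acc ++ [s] else acc) acc) ([] : List String)
  let st := (List.range' 1 cand.length).foldl (fun st k =>
      (pvCombos k cand).foldl (fun (st : List (Int × List (String × List String)) × Int) tup =>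
        let cc := tup.foldl (fun d e => (PySem.Str.split₀ e).foldl pvStepA d) PySem.Dict.empty
        let flag := cc.keys.any (fun w => decide (tc.getD w 0 < cc.getD w 0))
        if flag = false then
          (st.1 ++ [(st.2, [("tokens", pvGetTokens Q tup), ("entities", tup)])], st.2 + 1)
        else st) st)
      (([(0, [("entities", ([] : List String)), ("tokens", toks)])] : List (Int × List (String × List String))), (1 : Int))
  st.1

-- ===== PORT B =====
def pvAddW (d : PySem.Dict String Int) (w : String) : PySem.Dict String Int := d.insert w (d.getD w 0 + 1)

-- B's pick(cnt, cands, k): lex-ordered k-subsets whose words stay within budget, pruning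
-- every extension of an over-budget prefix
def pvPick (budget : PySem.Dict String Int) : PySem.Dict String Int → List String → Nat → List (List String)
  | _, _, 0 => [[]]
  | _, [], _+1 => []
  | cnt, e :: rest, k+1 =>
      let p := (PySem.Str.split₀ e).foldl
        (fun (p : PySem.Dict String Int × Bool) w =>
          let d := pvAddW p.1 w
          (d, p.2 && decide (d.getD w 0 ≤ budget.getD w 0))) (cnt, true)
      (if p.2 then (pvPick budget p.1 rest k).map (e :: ·) else []) ++ pvPick budget cnt rest (k+1)

def split_query_alt (Q : String) (DoE : List String) : List (Int × List (String × List String)) :=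
  let toks := PySem.Str.split₀ Q
  let budget := toks.foldl pvAddW PySem.Dict.empty
  let maxLen := DoE.foldl (fun m e => max m (PySem.Str.split₀ e).length) 1
  let doeSet := PySem.Set.ofList DoE
  let cand := ((List.range' 1 maxLen).foldl (fun p k =>
      (pvCombos k toks).foldl (fun (p : PySem.Set String × List String) tup =>
        let s := PySem.Str.join " " tup
        if PySem.Set.contains doeSet s && !(PySem.Set.contains p.1 s) then (PySem.Set.add p.1 s, p.2 ++ [s]) else p) p)
      ((PySem.Set.empty : PySem.Set String), ([] : List String))).2
  let subsets := (List.range' 1 cand.length).foldl (fun acc k => acc ++ pvPick budget PySem.Dict.empty cand k) []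
  (0, [("entities", ([] : List String)), ("tokens", toks)]) ::
    (PySem.List.enumerate subsets 1).map (fun p => (p.1, [("tokens", pvGetTokens Q p.2), ("entities", p.2)]))

-- ===== PRECONDITION & SPEC =====
def Spec_split_query (Q : String) (DoE : List String) (out : List (Int × List (String × List String))) : Prop := out = split_query_alt Q DoE
instance (Q : String) (DoE : List String) (out : List (Int × List (String × List String))) : Decidable (Spec_split_query Q DoE out) := by unfold Spec_split_query; infer_instance

-- ===== CLAIM (what is proved, stated in full; the proofs are below) =====
def Claim_equal_split_query : Prop := ∀ (Q : String) (DoE : List String), Dom_split_query Q DoE → Spec_split_query Q DoE (split_query Q DoE)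

-- ===== LEMMAS AND PROOFS =====

-- proof-side abbreviation: "every word of l occurs in l at most its budget"
def pvOk (budget : PySem.Dict String Int) (l : List String) : Bool :=
  decide (∀ w ∈ l, ((l.count w : Int)) ≤ budget.getD w 0)

theorem pvDict_getD_of_not_contains (d : PySem.Dict String Int) (w : String)
    (h : d.contains w = false) : d.getD w 0 = 0 := by
  have h2 : d.get? w = none := by
    have := PySem.Dict.contains_eq_isSome_get? d w
    rw [h] at this
    exact Option.not_isSome_iff_eq_none.mp (by simp [← this])
  simp [PySem.Dict.getD, h2]

theorem pvStepA_eq : pvStepA = pvAddW := by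
  funext d w
  unfold pvStepA pvAddW
  by_cases h : d.contains w = true
  · simp [h]
  · simp only [Bool.not_eq_true] at h
    rw [if_neg (by simp [h]), pvDict_getD_of_not_contains d w h]
    norm_num

theorem pv_foldl_flatMap {γ σ β : Type} (l : List γ) (f : γ → List σ) (g : β → σ → β) (init : β) :
    (l.flatMap f).foldl g init = l.foldl (fun a k => (f k).foldl g a) init := by
  induction l generalizing init with
  | nil => rfl
  | cons x xs ih => simp [List.foldl_append, ih]

theorem pv_enum_fold {σ R : Type} (p : σ → Prop) [DecidablePred p] (g : σ → R) :
    ∀ (L : List σ) (res : List (Int × R)) (i : Int),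
    L.foldl (fun st tup => if p tup then (st.1 ++ [(st.2, g tup)], st.2 + 1) else st) (res, i)
      = (res ++ PySem.List.enumerate ((L.filter (fun x => decide (p x))).map g) i,
         i + (((L.filter (fun x => decide (p x))).length : Int))) := by
  intro L
  induction L with
  | nil => intro res i; simp [PySem.List.enumerate_nil]
  | cons x xs ih =>
    intro res i
    by_cases h : p x
    · simp only [List.foldl_cons, if_pos h, ih, List.filter_cons, decide_eq_true h,
        if_pos trivial, List.map_cons, PySem.List.enumerate_cons, List.length_cons]
      refine Prod.ext ?_ ?_
      · simp [List.append_assoc]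
      · push_cast; ring
    · simp [List.foldl_cons, ih, h]

theorem pv_map_enumerate {σ R : Type} (g : σ → R) (xs : List σ) (i : Int) :
    (PySem.List.enumerate xs i).map (fun p => (p.1, g p.2)) = PySem.List.enumerate (xs.map g) i := by
  induction xs generalizing i with
  | nil => simp [PySem.List.enumerate_nil]
  | cons x xs ih => simp [PySem.List.enumerate_cons, ih]

-- candidate phase: A's list-membership dedup = B's seen-set dedup
theorem pv_cand_eq (DoE : List String) :
    ∀ (L : List (List String)) (acc : List String) (seen : PySem.Set String),
    (∀ x, PySem.Set.contains seen x = true ↔ x ∈ acc) →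
    (L.foldl (fun acc tup =>
        let s := PySem.Str.join " " tup
        if s ∈ DoE ∧ s ∉ acc then acc ++ [s] else acc) acc)
      = (L.foldl (fun (p : PySem.Set String × List String) tup =>
        let s := PySem.Str.join " " tup
        if PySem.Set.contains (PySem.Set.ofList DoE) s && !(PySem.Set.contains p.1 s) then (PySem.Set.add p.1 s, p.2 ++ [s]) else p) (seen, acc)).2 := by
  intro L
  induction L with
  | nil => intro acc seen _; rfl
  | cons tup L ih =>
    intro acc seen hinv
    simp only [List.foldl_cons]
    have hcond : (PySem.Set.contains (PySem.Set.ofList DoE) (PySem.Str.join " " tup)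
        && !(PySem.Set.contains seen (PySem.Str.join " " tup))) = true
        ↔ (PySem.Str.join " " tup ∈ DoE ∧ PySem.Str.join " " tup ∉ acc) := by
      rw [Bool.and_eq_true, PySem.Set.contains_iff, PySem.Set.mem_ofList, Bool.not_eq_true']
      constructor
      · rintro ⟨h1, h2⟩
        exact ⟨h1, fun hm => by rw [(hinv _).mpr hm] at h2; exact absurd h2 (by simp)⟩
      · rintro ⟨h1, h2⟩
        refine ⟨h1, ?_⟩
        cases hc : PySem.Set.contains seen (PySem.Str.join " " tup)
        · rfl
        · exact absurd ((hinv _).mp hc) h2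
    by_cases hc : (PySem.Str.join " " tup ∈ DoE ∧ PySem.Str.join " " tup ∉ acc)
    · rw [if_pos hc, if_pos (hcond.mpr hc)]
      refine ih _ _ (fun x => ?_)
      rw [PySem.Set.contains_iff, PySem.Set.mem_add, List.mem_append, List.mem_singleton]
      rw [← PySem.Set.contains_iff, hinv x]
    · rw [if_neg hc, if_neg (by rw [hcond]; exact hc)]
      exact ih _ _ hinv

theorem pv_fold_fst (budget : PySem.Dict String Int) (l : List String) (cnt : PySem.Dict String Int) (b : Bool) :
    (l.foldl (fun (p : PySem.Dict String Int × Bool) w =>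
        let d := pvAddW p.1 w
        (d, p.2 && decide (d.getD w 0 ≤ budget.getD w 0))) (cnt, b)).1
      = l.foldl pvAddW cnt := by
  induction l generalizing cnt b with
  | nil => rfl
  | cons w l ih => simp only [List.foldl_cons]; exact ih _ _

theorem pvAddW_getD_ne (d : PySem.Dict String Int) (w u : String) (h : u ≠ w) :
    (pvAddW d w).getD u 0 = d.getD u 0 := by
  unfold pvAddW
  exact PySem.Dict.getD_insert_of_ne d _ 0 h

theorem pv_fold_snd (budget : PySem.Dict String Int) (l : List String) (d : PySem.Dict String Int) (b : Bool) :
    (l.foldl (fun (p : PySem.Dict String Int × Bool) w =>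
        let d := pvAddW p.1 w
        (d, p.2 && decide (d.getD w 0 ≤ budget.getD w 0))) (d, b)).2
      = (b && decide (∀ w ∈ l, d.getD w 0 + (l.count w : Int) ≤ budget.getD w 0)) := by
  induction l generalizing d b with
  | nil => simp
  | cons w l ih =>
    simp only [List.foldl_cons]
    rw [ih]
    have haddw : (pvAddW d w).getD w 0 = d.getD w 0 + 1 := PySem.Dict.getD_insert_self d w _ 0
    cases b with
    | false => simp
    | true =>
      simp only [Bool.true_and]
      rw [← Bool.decide_and, decide_eq_decide]
      constructor
      · rintro ⟨h0, h1⟩ u hu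
        rw [haddw] at h0
        by_cases huw : u = w
        · subst huw
          by_cases hul : u ∈ l
          · have := h1 u hul
            rw [haddw] at this
            rw [List.count_cons_self]
            push_cast at this ⊢
            omega
          · rw [List.count_cons_self, List.count_eq_zero_of_not_mem hul]
            push_cast
            omega
        · have hul : u ∈ l := by
            rcases List.mem_cons.mp hu with h | h
            · exact absurd h huw
            · exact h
          have := h1 u hul
          rw [pvAddW_getD_ne d w u huw] at this
          rw [show List.count u (w :: l) = List.count u l from by simp [Ne.symm huw]]
          exact this
      · intro h
        have hw0 := h w List.mem_cons_self
        rw [List.count_cons_self] at hw0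
        refine ⟨?_, ?_⟩
        · rw [haddw]
          have : (0 : Int) ≤ (l.count w : Int) := by positivity
          push_cast at hw0
          omega
        · intro u hu
          by_cases huw : u = w
          · subst huw
            rw [haddw]
            push_cast at hw0 ⊢
            omega
          · rw [pvAddW_getD_ne d w u huw]
            have := h u (List.mem_cons_of_mem _ hu)
            rw [show List.count u (w :: l) = List.count u l from by simp [Ne.symm huw]] at this
            exact this

theorem pvCount_counter (ws : List String) (v : String) :
    (ws.foldl pvAddW PySem.Dict.empty).getD v 0 = (ws.count v : Int) := by
  unfold pvAddW
  rw [PySem.Dict.getD_foldl_insert_add_one]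
  simp

-- pick = filter of combinations
theorem pv_pick_eq (budget : PySem.Dict String Int) :
    ∀ (cands : List String) (k : Nat) (ws : List String),
    pvOk budget ws = true →
    pvPick budget (ws.foldl pvAddW PySem.Dict.empty) cands k
      = (pvCombos k cands).filter (fun tup => pvOk budget (ws ++ tup.flatMap PySem.Str.split₀)) := by
  intro cands
  induction cands with
  | nil =>
    intro k ws h
    cases k with
    | zero =>
      have hnilok : pvOk budget (ws ++ ([] : List String).flatMap PySem.Str.split₀) = true := by
        simpa using h
      simp only [pvPick, pvCombos, List.filter_cons, hnilok, if_pos]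
      simp
    | succ k => simp [pvPick, pvCombos]
  | cons e rest ih =>
    intro k ws h
    cases k with
    | zero =>
      have hnilok : pvOk budget (ws ++ ([] : List String).flatMap PySem.Str.split₀) = true := by
        simpa using h
      simp only [pvPick, pvCombos, List.filter_cons, hnilok, if_pos]
      simp
    | succ k =>
      rw [pvPick, pvCombos]
      rw [pv_fold_fst, pv_fold_snd]
      simp only [Bool.true_and]
      have hcnt : (PySem.Str.split₀ e).foldl pvAddW (ws.foldl pvAddW PySem.Dict.empty)
          = (ws ++ PySem.Str.split₀ e).foldl pvAddW PySem.Dict.empty := by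
        rw [List.foldl_append]
      have hget : ∀ w, (ws.foldl pvAddW PySem.Dict.empty).getD w 0 + ((PySem.Str.split₀ e).count w : Int)
          = ((ws ++ PySem.Str.split₀ e).count w : Int) := by
        intro w; rw [pvCount_counter, List.count_append]; push_cast; ring
      rw [List.filter_append]
      by_cases hok : ∀ w ∈ PySem.Str.split₀ e,
          (((ws ++ PySem.Str.split₀ e).count w : Int)) ≤ budget.getD w 0
      · have hdec : decide (∀ w ∈ PySem.Str.split₀ e,
            (ws.foldl pvAddW PySem.Dict.empty).getD w 0 + ((PySem.Str.split₀ e).count w : Int) ≤ budget.getD w 0) = true := by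
          rw [decide_eq_true_eq]
          intro w hw; rw [hget w]; exact hok w hw
        have hOkApp : pvOk budget (ws ++ PySem.Str.split₀ e) = true := by
          unfold pvOk
          rw [decide_eq_true_eq]
          intro w hw
          rcases List.mem_append.mp hw with hws | hwe
          · by_cases hwe2 : w ∈ PySem.Str.split₀ e
            · exact hok w hwe2
            · rw [List.count_append, List.count_eq_zero_of_not_mem hwe2]
              have := (decide_eq_true_eq.mp h) w hws
              simpa using this
          · exact hok w hwe
        rw [hdec, if_pos rfl, hcnt, ih k _ hOkApp, ih (k + 1) ws h]
        rw [List.filter_map]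
        congr 1
        refine congrArg (List.map _) (List.filter_congr ?_)
        intro tup _
        simp only [Function.comp_apply, List.flatMap_cons, List.append_assoc]
      · have hdec : decide (∀ w ∈ PySem.Str.split₀ e,
            (ws.foldl pvAddW PySem.Dict.empty).getD w 0 + ((PySem.Str.split₀ e).count w : Int) ≤ budget.getD w 0) = false := by
          rw [decide_eq_false_iff_not]
          intro hall
          exact hok (fun w hw => by rw [← hget w]; exact hall w hw)
        have hnil : ((pvCombos k rest).map (e :: ·)).filter
            (fun tup => pvOk budget (ws ++ tup.flatMap PySem.Str.split₀)) = [] := by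
          rw [List.filter_eq_nil_iff]
          intro x hx
          rcases List.mem_map.mp hx with ⟨tup, _, rfl⟩
          push Not at hok
          rcases hok with ⟨w, hw, hgt⟩
          unfold pvOk
          simp only [decide_eq_true_eq, not_forall]
          refine ⟨w, ?_, ?_⟩
          · exact List.mem_append.mpr (Or.inr (by simp [List.flatMap_cons]; exact Or.inl hw))
          · simp only [List.flatMap_cons, not_le]
            calc budget.getD w 0 < ((ws ++ PySem.Str.split₀ e).count w : Int) := hgt
              _ ≤ _ := by
                rw [List.count_append, List.count_append, List.count_append]
                push_cast
                have : (0 : Int) ≤ ((tup.flatMap PySem.Str.split₀).count w : Int) := by positivity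
                push_cast at this
                omega
        rw [hdec, if_neg (by simp), hnil, List.nil_append]
        exact ih (k + 1) ws h

-- A's flag test = pvOk with toks-counts as budget
theorem pv_flag_eq (toks : List String) (tup : List String) :
    (((tup.flatMap PySem.Str.split₀).foldl pvAddW PySem.Dict.empty).keys.any
        (fun w => decide ((toks.foldl pvAddW PySem.Dict.empty).getD w 0 < ((tup.flatMap PySem.Str.split₀).foldl pvAddW PySem.Dict.empty).getD w 0)) = false)
      ↔ pvOk (toks.foldl pvAddW PySem.Dict.empty) (tup.flatMap PySem.Str.split₀) = true := by
  have hkeys : ((tup.flatMap PySem.Str.split₀).foldl pvAddW PySem.Dict.empty).keys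
      = PySem.Set.ofList (tup.flatMap PySem.Str.split₀) := by
    unfold pvAddW
    rw [PySem.Dict.keys_foldl_insert _ (fun d x => d.getD x 0 + 1)]
    simp [PySem.Set.update_nil_left]
  have hcc : ∀ v, ((tup.flatMap PySem.Str.split₀).foldl pvAddW PySem.Dict.empty).getD v 0
      = ((tup.flatMap PySem.Str.split₀).count v : Int) := by
    intro v; unfold pvAddW
    rw [PySem.Dict.getD_foldl_insert_add_one]
    simp
  have htc : ∀ v, ((toks.foldl pvAddW PySem.Dict.empty)).getD v 0 = ((toks.count v : Int)) := by
    intro v; unfold pvAddW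
    rw [PySem.Dict.getD_foldl_insert_add_one]
    simp
  rw [hkeys]
  unfold pvOk
  rw [List.any_eq_false, decide_eq_true_eq]
  constructor
  · intro h w hw
    have := h w ((PySem.Set.mem_ofList _ _).mpr hw)
    simp only [decide_eq_true_eq, not_lt] at this
    rw [hcc w] at this
    exact this
  · intro h w hw
    have := h w ((PySem.Set.mem_ofList _ _).mp hw)
    simp only [decide_eq_true_eq, not_lt]
    rw [hcc w]
    exact this

-- ===== VERDICT (by name: the statement is the Claim_ definition above) =====
theorem split_query_spec : Claim_equal_split_query := by
  intro Q DoE _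
  unfold Spec_split_query split_query split_query_alt
  dsimp only
  -- shared pieces of both ports
  set toks := PySem.Str.split₀ Q with htoks
  -- max entity word-length: A's if-update = B's max
  have hmax : DoE.foldl (fun m e => if m < (PySem.Str.split₀ e).length then (PySem.Str.split₀ e).length else m) 1
      = DoE.foldl (fun m e => max m (PySem.Str.split₀ e).length) 1 := by
    refine PySem.List.foldl_congr_mem DoE _ _ 1 (fun acc e _ => ?_)
    rw [Nat.max_def]
    split_ifs <;> omega
  rw [hmax, pvStepA_eq]
  set maxLen := DoE.foldl (fun m e => max m (PySem.Str.split₀ e).length) 1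
  set tc := toks.foldl pvAddW PySem.Dict.empty with htc
  -- candidate lists agree
  have hcand : (List.range' 1 maxLen).foldl (fun acc k =>
        (pvCombos k toks).foldl (fun acc tup =>
          let s := PySem.Str.join " " tup
          if s ∈ DoE ∧ s ∉ acc then acc ++ [s] else acc) acc) ([] : List String)
      = ((List.range' 1 maxLen).foldl (fun p k =>
        (pvCombos k toks).foldl (fun (p : PySem.Set String × List String) tup =>
          let s := PySem.Str.join " " tup
          if PySem.Set.contains (PySem.Set.ofList DoE) s && !(PySem.Set.contains p.1 s) then (PySem.Set.add p.1 s, p.2 ++ [s]) else p) p)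
        ((PySem.Set.empty : PySem.Set String), ([] : List String))).2 := by
    rw [← pv_foldl_flatMap (List.range' 1 maxLen) (fun k => pvCombos k toks)]
    rw [← pv_foldl_flatMap (List.range' 1 maxLen) (fun k => pvCombos k toks)]
    exact pv_cand_eq DoE _ [] PySem.Set.empty (fun x => by simp [PySem.Set.empty, PySem.Set.contains])
  rw [hcand]
  set cand := ((List.range' 1 maxLen).foldl (fun p k =>
        (pvCombos k toks).foldl (fun (p : PySem.Set String × List String) tup =>
          let s := PySem.Str.join " " tup
          if PySem.Set.contains (PySem.Set.ofList DoE) s && !(PySem.Set.contains p.1 s) then (PySem.Set.add p.1 s, p.2 ++ [s]) else p) p)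
        ((PySem.Set.empty : PySem.Set String), ([] : List String))).2
  -- B's subsets = A's filtered combination stream
  have hsubsets : (List.range' 1 cand.length).foldl (fun acc k => acc ++ pvPick tc PySem.Dict.empty cand k) []
      = ((List.range' 1 cand.length).flatMap (fun k => pvCombos k cand)).filter
          (fun tup => pvOk tc (tup.flatMap PySem.Str.split₀)) := by
    rw [PySem.List.foldl_append_eq_flatMap, List.nil_append, List.filter_flatMap]
    refine List.flatMap_congr (fun k _ => ?_)
    have := pv_pick_eq tc cand k [] (by simp [pvOk])
    simpa using this
  -- A's numbering loop, flattened and rendered as an enumerated filter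
  have hA : ((List.range' 1 cand.length).foldl (fun st k =>
      (pvCombos k cand).foldl (fun (st : List (Int × List (String × List String)) × Int) tup =>
        let cc := tup.foldl (fun d e => (PySem.Str.split₀ e).foldl pvAddW d) PySem.Dict.empty
        let flag := cc.keys.any (fun w => decide (tc.getD w 0 < cc.getD w 0))
        if flag = false then
          (st.1 ++ [(st.2, [("tokens", pvGetTokens Q tup), ("entities", tup)])], st.2 + 1)
        else st) st)
      (([(0, [("entities", ([] : List String)), ("tokens", toks)])] : List (Int × List (String × List String))), (1 : Int))).1
      = (0, [("entities", ([] : List String)), ("tokens", toks)]) ::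
          PySem.List.enumerate ((((List.range' 1 cand.length).flatMap (fun k => pvCombos k cand)).filter
            (fun tup => pvOk tc (tup.flatMap PySem.Str.split₀))).map
              (fun tup => [("tokens", pvGetTokens Q tup), ("entities", tup)])) 1 := by
    rw [← pv_foldl_flatMap (List.range' 1 cand.length) (fun k => pvCombos k cand)]
    have hcc : ∀ tup : List String,
        tup.foldl (fun d e => (PySem.Str.split₀ e).foldl pvAddW d) PySem.Dict.empty
          = (tup.flatMap PySem.Str.split₀).foldl pvAddW PySem.Dict.empty := by
      intro tup
      rw [pv_foldl_flatMap]
    have hstep : ((List.range' 1 cand.length).flatMap (fun k => pvCombos k cand)).foldl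
        (fun (st : List (Int × List (String × List String)) × Int) tup =>
          let cc := tup.foldl (fun d e => (PySem.Str.split₀ e).foldl pvAddW d) PySem.Dict.empty
          let flag := cc.keys.any (fun w => decide (tc.getD w 0 < cc.getD w 0))
          if flag = false then
            (st.1 ++ [(st.2, [("tokens", pvGetTokens Q tup), ("entities", tup)])], st.2 + 1)
          else st)
        (([(0, [("entities", ([] : List String)), ("tokens", toks)])] : List (Int × List (String × List String))), (1 : Int))
        = ((List.range' 1 cand.length).flatMap (fun k => pvCombos k cand)).foldl
        (fun (st : List (Int × List (String × List String)) × Int) tup =>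
          if pvOk tc (tup.flatMap PySem.Str.split₀) = true then
            (st.1 ++ [(st.2, [("tokens", pvGetTokens Q tup), ("entities", tup)])], st.2 + 1)
          else st)
        (([(0, [("entities", ([] : List String)), ("tokens", toks)])] : List (Int × List (String × List String))), (1 : Int)) := by
      refine PySem.List.foldl_congr_mem _ _ _ _ (fun st tup _ => ?_)
      simp only [hcc tup]
      by_cases hfl : pvOk tc (tup.flatMap PySem.Str.split₀) = true
      · rw [if_pos ((pv_flag_eq toks tup).mpr hfl), if_pos hfl]
      · rw [if_neg (fun hcontra => hfl ((pv_flag_eq toks tup).mp hcontra)), if_neg hfl]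
    rw [hstep, pv_enum_fold (fun tup => pvOk tc (tup.flatMap PySem.Str.split₀) = true)
      (fun tup => [("tokens", pvGetTokens Q tup), ("entities", tup)])]
    simp
  rw [hA, hsubsets,
    pv_map_enumerate (fun tup => [("tokens", pvGetTokens Q tup), ("entities", tup)]) _ 1]
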